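-- pv_equiv track=rewrite | github.com/d3ns0n/application-BI | find_strings/find_strings.py | permutate
-- ===== SOURCE A (Python) =====
-- def permutate(string):
--     """ Generate all possible permutations of given string in given order
--     :param string: string to generate permutations
--     :return: a list of all permutations
--     """
--     result = [[string]]
--     for i in range(1, len(string)):
--         first = [string[:i]]
--         rest = string[i:]
--         for p in permutate(rest):
--             result.append(first + p)
--     return result
-- ===== SOURCE B (Python) =====
-- def permutate(string):
--     """Iterative stack-based DFS emitting the same preorder as the recursive version."""
--     result = []
--     stack = [([], string)]
--     while stack:
--         acc, rest = stack.pop()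
--         result.append(acc + [rest])
--         for i in range(len(rest) - 1, 0, -1):
--             stack.append((acc + [rest[:i]], rest[i:]))
--     return result
-- ===== Notes on version B (the rewrite author's own statement) =====
-- stated objective: alternative
-- what changed: Replaced the naive recursion with an explicit stack-based iterative DFS that carries (accumulated-prefix, remaining-suffix) states and pushes children in reverse so the LIFO order reproduces A's exact preorder of partitions.
import Mathlib
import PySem

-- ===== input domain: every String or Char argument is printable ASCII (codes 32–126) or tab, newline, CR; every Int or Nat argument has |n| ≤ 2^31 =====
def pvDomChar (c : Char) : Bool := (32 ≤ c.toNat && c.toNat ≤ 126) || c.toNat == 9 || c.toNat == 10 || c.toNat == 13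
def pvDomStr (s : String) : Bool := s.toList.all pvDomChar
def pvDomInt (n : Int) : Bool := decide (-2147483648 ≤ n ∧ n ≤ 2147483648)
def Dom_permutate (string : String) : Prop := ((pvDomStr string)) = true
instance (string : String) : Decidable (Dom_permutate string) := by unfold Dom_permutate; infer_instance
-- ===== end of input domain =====

-- B replaces A's recursion by an explicit stack-based iterative DFS emitting the same preorder.

-- ===== PORT A =====
-- A recurses on the string; we transcribe it over List Char (s[:i]/s[i:] with 0 ≤ i are exactly take/drop).
-- `range(1, len(string))` → List.range' 1 (l.length - 1); the nested append loops → map + flatten in the same order.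
def permA (l : List Char) : List (List (List Char)) :=
  [l] :: ((List.range' 1 (l.length - 1)).attach.map
      (fun i => (permA (l.drop i.1)).map (fun p => l.take i.1 :: p))).flatten
termination_by l.length
decreasing_by
  have h := List.mem_range'.mp i.2
  simp only [List.length_drop]
  omega

def permutate (string : String) : List (List String) :=
  (permA string.toList).map (fun p => p.map (fun cs => String.mk cs))

-- ===== PORT B =====
-- stack of (acc, rest) pairs, head = top of stack; `for i in range(len(rest)-1, 0, -1): stack.append(...)`
-- pushes children for i = len-1 .. 1, i.e. folds over the reversed index range.
def childPush (acc : List (List Char)) (rest : List Char)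
    (stk : List (List (List Char) × List Char)) : List (List (List Char) × List Char) :=
  ((List.range' 1 (rest.length - 1)).reverse).foldl
    (fun st i => (acc ++ [rest.take i], rest.drop i) :: st) stk

def stackSum (stk : List (List (List Char) × List Char)) : Nat :=
  (stk.map (fun pr => 3 ^ pr.2.length)).sum

-- termination measure lemma, cited by runB's decreasing_by
theorem powSum_le (n : Nat) : ∀ m, m ≤ n →
    ((List.range' 1 m).map (fun i => 3 ^ (n - i))).sum + 3 ^ (n - m) ≤ 3 ^ n := by
  intro m
  induction m with
  | zero => simp
  | succ k ih =>
    intro h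
    rw [List.range'_concat]
    have hk := ih (by omega)
    have h3 : 3 ^ (n - k) = 3 * 3 ^ (n - (k + 1)) := by
      rw [← pow_succ']
      congr 1
      omega
    have hx : 1 + 1 * k = k + 1 := by omega
    simp only [hx, List.map_append, List.map_cons, List.map_nil, List.sum_append, List.sum_cons,
      List.sum_nil]
    omega

theorem childPush_eq (acc : List (List Char)) (rest : List Char)
    (stk : List (List (List Char) × List Char)) :
    childPush acc rest stk =
      (List.range' 1 (rest.length - 1)).map (fun i => (acc ++ [rest.take i], rest.drop i)) ++ stk := by
  unfold childPush
  rw [List.foldl_reverse]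
  induction List.range' 1 (rest.length - 1) with
  | nil => rfl
  | cons x xs ih => simp [ih]

theorem stackSum_childPush (acc : List (List Char)) (rest : List Char)
    (stk : List (List (List Char) × List Char)) :
    stackSum (childPush acc rest stk) < stackSum ((acc, rest) :: stk) := by
  rw [childPush_eq]
  unfold stackSum
  simp only [List.map_append, List.sum_append, List.map_cons, List.sum_cons, List.map_map]
  have key : ((List.range' 1 (rest.length - 1)).map (fun i => 3 ^ (rest.length - i))).sum
      < 3 ^ rest.length := by
    rcases Nat.eq_zero_or_pos rest.length with h0 | h0
    · simp [h0]
    · have := powSum_le rest.length (rest.length - 1) (by omega)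
      have h1 : rest.length - (rest.length - 1) = 1 := by omega
      rw [h1] at this
      omega
  have hcomp : ((List.range' 1 (rest.length - 1)).map
      ((fun pr : List (List Char) × List Char => 3 ^ pr.2.length) ∘
        fun i => (acc ++ [rest.take i], rest.drop i))).sum
      = ((List.range' 1 (rest.length - 1)).map (fun i => 3 ^ (rest.length - i))).sum := by
    congr 1
    apply List.map_congr_left
    intro i _
    simp [List.length_drop]
  rw [hcomp]
  omega

def runB : List (List (List Char) × List Char) → List (List (List Char)) → List (List (List Char))
  | [], res => res
  | (acc, rest) :: stk, res => runB (childPush acc rest stk) (res ++ [acc ++ [rest]])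
termination_by stk _ => stackSum stk
decreasing_by exact stackSum_childPush _ _ _

def permutate_alt (string : String) : List (List String) :=
  (runB [([], string.toList)] []).map (fun p => p.map (fun cs => String.mk cs))

-- ===== PRECONDITION & SPEC =====
def Spec_permutate (string : String) (out : List (List String)) : Prop := out = permutate_alt string
instance (string : String) (out : List (List String)) : Decidable (Spec_permutate string out) := by unfold Spec_permutate; infer_instance

-- ===== CLAIM (what is proved, stated in full; the proofs are below) =====
def Claim_equal_permutate : Prop := ∀ (string : String), Dom_permutate string → Spec_permutate string (permutate string)

-- ===== LEMMAS AND PROOFS =====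

-- attach-free unfolding of permA
theorem permA_eq (l : List Char) :
    permA l = [l] :: ((List.range' 1 (l.length - 1)).map
      (fun i => (permA (l.drop i)).map (fun p => l.take i :: p))).flatten := by
  rw [permA]
  congr 2
  exact List.attach_map_val
    (f := fun i => (permA (l.drop i)).map (fun p => l.take i :: p))

-- invariant: running the stack emits, for each (acc, rest) frame in order, acc-prefixed permA rest
theorem runB_spec (stk : List (List (List Char) × List Char)) (res : List (List (List Char))) :
    runB stk res = res ++ (stk.map (fun pr => (permA pr.2).map (fun p => pr.1 ++ p))).flatten := by
  match stk with
  | [] => simp [runB]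
  | (acc, rest) :: stk' =>
    rw [runB, runB_spec (childPush acc rest stk') (res ++ [acc ++ [rest]])]
    rw [childPush_eq]
    simp only [List.map_append, List.flatten_append, List.map_cons, List.flatten_cons,
      List.append_assoc, List.map_map]
    congr 1
    rw [← List.append_assoc]
    congr 1
    rw [permA_eq]
    simp only [List.map_cons, List.map_flatten, List.map_map, List.singleton_append]
    congr 2
    apply List.map_congr_left
    intro i _
    simp only [Function.comp]
    rw [List.map_map]
    apply List.map_congr_left
    intro p _
    simp
termination_by stackSum stk
decreasing_by exact stackSum_childPush _ _ _

-- ===== VERDICT (by name: the statement is the Claim_ definition above) =====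
theorem permutate_spec : Claim_equal_permutate := by
  intro s _
  unfold Spec_permutate permutate permutate_alt
  rw [runB_spec]
  simp
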